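-- pv_equiv track=rewrite | github.com/liduinopitombeira/melodic-generation | abordagemmarkovdescritiva.py | MatrixTransitionraw
-- ===== SOURCE A (Python) =====
-- def MatrixTransitionraw(A):
--
--     #List with unique values of A and in ascending order
--     Aset = list(set(A))
--     Aset.sort()
--
--     #List of list filled with zeros (this will be filled by the iteractions)
--     M = [[0]*len(Aset) for i in range(len(Aset))]
--
--     #Gera a matriz de transição de probabilidades
--     for i in range(len(A)-1):
--         pos_linha = Aset.index(A[i])
--         pos_coluna = Aset.index(A[i+1])
--         M[pos_linha][pos_coluna]+=1
--
--
--     return(M)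
-- ===== SOURCE B (Python) =====
-- def MatrixTransitionraw(A):
--     # Phase 1: aggregate consecutive-pair transition counts into a table.
--     counts = {}
--     for pair in zip(A, A[1:]):
--         counts[pair] = counts.get(pair, 0) + 1
--     # Phase 2: lay the table out over the sorted unique values.
--     Aset = sorted(set(A))
--     return [[counts.get((u, v), 0) for v in Aset] for u in Aset]
-- ===== Notes on version B (the rewrite author's own statement) =====
-- stated objective: alternative
-- what changed: A scatters position by position into a zero matrix, calling Aset.index twice per step; B is a two-phase decomposition: it first aggregates consecutive-pair counts into a dict in one pass, then lays the table out over the sorted unique values by comprehension.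
import Mathlib
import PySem

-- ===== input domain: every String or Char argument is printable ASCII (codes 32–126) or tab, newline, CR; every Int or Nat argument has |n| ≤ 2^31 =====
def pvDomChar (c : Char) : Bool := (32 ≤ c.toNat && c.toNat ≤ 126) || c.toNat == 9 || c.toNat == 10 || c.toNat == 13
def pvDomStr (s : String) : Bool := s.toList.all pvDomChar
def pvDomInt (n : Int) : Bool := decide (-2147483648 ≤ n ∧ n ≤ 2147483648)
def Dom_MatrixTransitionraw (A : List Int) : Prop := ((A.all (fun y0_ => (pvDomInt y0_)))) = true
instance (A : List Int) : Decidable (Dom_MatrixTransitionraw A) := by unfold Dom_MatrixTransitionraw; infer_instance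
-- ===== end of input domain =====

-- B re-implements A by a two-phase decomposition: aggregate consecutive-pair counts into a
-- dict first, then lay the table out over the sorted unique values (same cost, different shape).

-- the sorted list of unique values of A (Python: 'Aset = list(set(A)); Aset.sort()' / 'sorted(set(A))')
def pvAxis (A : List Int) : List Int :=
  PySem.List.sorted (PySem.Set.ofList A) (fun x => x) false

-- ===== PORT A =====
-- Aset.index never raises here (A[i] is always a member of Aset), so the ValueError branch is unreachable; .getD 0 only totalises it.
def MatrixTransitionraw (A : List Int) : List (List Int) :=
  (PySem.List.pyRange 0 ((A.length : Int) - 1)).foldl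
    (fun M i =>
      M.modify ((PySem.List.index? (pvAxis A) ((PySem.List.pyGet? A i).getD 0)).getD 0)
        (fun row => row.modify
          ((PySem.List.index? (pvAxis A) ((PySem.List.pyGet? A (i + 1)).getD 0)).getD 0)
          (· + 1)))
    ((PySem.List.pyRange 0 ((pvAxis A).length : Int)).map
      (fun _ => PySem.List.pyRepeat [(0 : Int)] ((pvAxis A).length : Int)))

-- ===== PORT B =====
def MatrixTransitionraw_alt (A : List Int) : List (List Int) :=
  let counts := (A.zip (PySem.List.slice A (some 1) none)).foldl
    (fun d p => d.insert p (d.getD p 0 + 1)) PySem.Dict.empty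
  (pvAxis A).map (fun u => (pvAxis A).map (fun v => counts.getD (u, v) 0))

-- ===== PRECONDITION & SPEC =====
def Spec_MatrixTransitionraw (A : List Int) (out : List (List Int)) : Prop := out = MatrixTransitionraw_alt A
instance (A : List Int) (out : List (List Int)) : Decidable (Spec_MatrixTransitionraw A out) := by unfold Spec_MatrixTransitionraw; infer_instance

-- ===== CLAIM (what is proved, stated in full; the proofs are below) =====
def Claim_equal_MatrixTransitionraw : Prop := ∀ (A : List Int), Dom_MatrixTransitionraw A → Spec_MatrixTransitionraw A (MatrixTransitionraw A)

-- ===== LEMMAS AND PROOFS =====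

-- A's loop body, as a function of the pair it processes
def pvStep (s : List Int) (M : List (List Int)) (p : Int × Int) : List (List Int) :=
  M.modify ((PySem.List.index? s p.1).getD 0)
    (fun row => row.modify ((PySem.List.index? s p.2).getD 0) (· + 1))

-- the transition matrix of a pair list over axis s
def pvMat (s : List Int) (ps : List (Int × Int)) : List (List Int) :=
  s.map (fun u => s.map (fun v => (ps.count (u, v) : Int)))

lemma pvAxis_nodup (A : List Int) : (pvAxis A).Nodup := by
  have h := PySem.List.sorted_perm (PySem.Set.ofList A) (fun x : Int => x) false
  exact h.nodup_iff.mpr (PySem.Set.nodup_ofList A)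

lemma pvAxis_mem (A : List Int) (x : Int) : x ∈ pvAxis A ↔ x ∈ A := by
  have h := PySem.List.sorted_perm (PySem.Set.ofList A) (fun x : Int => x) false
  rw [pvAxis, h.mem_iff, PySem.Set.mem_ofList]

lemma pv_getElem_index {s : List Int} {x : Int} (hx : x ∈ s) :
    ∃ k, PySem.List.index? s x = some k ∧ ∃ (hk : k < s.length), s[k] = x := by
  have h1 : (PySem.List.index? s x).isSome := (PySem.List.index?_isSome_iff s x).mpr hx
  obtain ⟨k, hk⟩ := Option.isSome_iff_exists.mp h1
  obtain ⟨hlt, hget, _⟩ := PySem.List.getElem_of_index?_eq_some hk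
  exact ⟨k, hk, hlt, hget⟩

-- one step of A's loop updates the transition matrix by one pair
lemma pvStep_mat {s : List Int} (hs : s.Nodup) {p : Int × Int}
    (hp1 : p.1 ∈ s) (hp2 : p.2 ∈ s) (ps : List (Int × Int)) :
    pvStep s (pvMat s ps) p = pvMat s (ps ++ [p]) := by
  obtain ⟨r, hr, hrlt, hrget⟩ := pv_getElem_index hp1
  obtain ⟨c, hc, hclt, hcget⟩ := pv_getElem_index hp2
  apply List.ext_getElem
  · simp [pvStep, pvMat]
  · intro i hi hi'
    have his : i < s.length := by simpa [pvMat] using hi'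
    simp only [pvStep, pvMat, hr, hc, Option.getD_some,
      List.getElem_modify, List.getElem_map]
    by_cases hir : r = i
    · rw [if_pos hir]
      apply List.ext_getElem
      · simp
      · intro j hj hj'
        have hjs : j < s.length := by simpa using hj'
        rw [List.getElem_modify]
        by_cases hjc : c = j
        · rw [if_pos hjc, List.getElem_map, List.getElem_map, List.count_append,
            List.count_singleton,
            if_pos (by subst hir; subst hjc; simp [hrget, hcget])]
          push_cast; ring
        · have hne : ¬ (p == (s[i], s[j])) = true := by
            intro hpe
            have hpe' : p = (s[i], s[j]) := by simpa using hpe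
            exact hjc (hs.getElem_inj_iff.mp
              (hcget.trans (show p.2 = s[j] by rw [hpe'])))
          rw [if_neg hjc, List.getElem_map, List.getElem_map, List.count_append,
            List.count_singleton, if_neg hne]
          simp
    · rw [if_neg hir]
      apply List.map_congr_left
      intro v _
      have hne : ¬ (p == (s[i], v)) = true := by
        intro hpe
        have hpe' : p = (s[i], v) := by simpa using hpe
        exact hir (hs.getElem_inj_iff.mp
          (hrget.trans (show p.1 = s[i] by rw [hpe'])))
      rw [List.count_append, List.count_singleton, if_neg hne]
      simp

-- A's whole loop computes the transition matrix
lemma pv_foldl_mat {s : List Int} (hs : s.Nodup) (ps qs : List (Int × Int))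
    (hmem : ∀ p ∈ ps, p.1 ∈ s ∧ p.2 ∈ s) :
    ps.foldl (pvStep s) (pvMat s qs) = pvMat s (qs ++ ps) := by
  induction ps generalizing qs with
  | nil => simp
  | cons p t ih =>
    have hp := hmem p (List.mem_cons_self)
    rw [List.foldl_cons, pvStep_mat hs hp.1 hp.2,
      ih (qs ++ [p]) (fun q hq => hmem q (List.mem_cons_of_mem _ hq)), List.append_assoc]
    rfl

-- the index list A's loop ranges over reads off exactly the consecutive pairs
lemma pv_range_pairs (A : List Int) :
    (PySem.List.pyRange 0 ((A.length : Int) - 1)).map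
      (fun i => (((PySem.List.pyGet? A i).getD 0), ((PySem.List.pyGet? A (i + 1)).getD 0)))
      = A.zip A.tail := by
  cases A with
  | nil => decide
  | cons a t =>
    rw [show (((a :: t).length : Int) - 1) = (t.length : Int) by push_cast [List.length_cons]; ring,
      PySem.List.pyRange_zero_natCast, List.map_map]
    apply List.ext_getElem
    · simp
    · intro i hi hi'
      have hil : i < t.length := by simpa using hi
      have h1 : ((i : Int) : Int) + 1 = ((i + 1 : Nat) : Int) := by push_cast; ring
      simp only [List.getElem_map, List.getElem_range, Function.comp]
      rw [h1, PySem.List.pyGet?_natCast, PySem.List.pyGet?_natCast,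
        List.getElem?_eq_getElem (by simp; omega), List.getElem?_eq_getElem (by simp; omega),
        List.getElem_zip]
      simp

lemma pv_init_mat (A : List Int) :
    (PySem.List.pyRange 0 ((pvAxis A).length : Int)).map
      (fun _ => PySem.List.pyRepeat [(0 : Int)] ((pvAxis A).length : Int))
      = pvMat (pvAxis A) [] := by
  simp [pvMat, PySem.List.pyRange_zero_natCast, PySem.List.pyRepeat_singleton,
    List.map_map, List.map_const', Function.comp_def]

-- ===== VERDICT (by name: the statement is the Claim_ definition above) =====
theorem MatrixTransitionraw_spec : Claim_equal_MatrixTransitionraw := by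
  intro A _
  show MatrixTransitionraw A = MatrixTransitionraw_alt A
  have hmem : ∀ p ∈ A.zip A.tail, p.1 ∈ pvAxis A ∧ p.2 ∈ pvAxis A := by
    rintro ⟨x, y⟩ hp
    obtain ⟨h1, h2⟩ := List.of_mem_zip hp
    exact ⟨(pvAxis_mem A x).mpr h1, (pvAxis_mem A y).mpr (List.tail_subset A h2)⟩
  have hA : MatrixTransitionraw A = pvMat (pvAxis A) (A.zip A.tail) := by
    have h := pv_foldl_mat (pvAxis_nodup A) (A.zip A.tail) [] hmem
    rw [← pv_range_pairs A, List.foldl_map] at h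
    rw [MatrixTransitionraw, pv_init_mat]
    simp only [pvStep, List.nil_append, pv_range_pairs A] at h
    exact h
  have hB : MatrixTransitionraw_alt A = pvMat (pvAxis A) (A.zip A.tail) := by
    have hsl : PySem.List.slice A (some 1) none = A.tail := by
      rw [PySem.List.slice_from A (by norm_num)]
      simp
    rw [MatrixTransitionraw_alt]
    show (pvAxis A).map _ = _
    apply List.map_congr_left
    intro u _
    apply List.map_congr_left
    intro v _
    rw [hsl, PySem.Dict.getD_foldl_insert_add_one, PySem.Dict.getD_empty]
    simp
  rw [hA, hB]
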